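-- pv_equiv track=rewrite | github.com/qpwpep/documate-personal | src/eval/generate_cases.py | _build_cell_targets
-- ===== SOURCE A (Python) =====
-- _CATEGORY_ORDER = ["docs_only", "rag_only", "hybrid", "tool_action"]
--
-- _SCENARIO_ORDER = ["seed_mutation", "adversarial", "regression", "ambiguity"]
--
-- def _build_cell_targets(total: int) -> dict[tuple[str, str], int]:
--     if total <= 0:
--         raise ValueError("target must be greater than 0")
--
--     rows = len(_CATEGORY_ORDER)
--     cols = len(_SCENARIO_ORDER)
--     cells = rows * cols
--
--     base = total // cells
--     remainder = total % cells
--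
--     targets = {(category, scenario): base for category in _CATEGORY_ORDER for scenario in _SCENARIO_ORDER}
--
--     # Distribute remainders so category totals and scenario totals stay balanced.
--     for index in range(remainder):
--         row = index % rows
--         col = (index // rows + row) % cols
--         targets[(_CATEGORY_ORDER[row], _SCENARIO_ORDER[col])] += 1
--
--     return targets
-- ===== SOURCE B (Python) =====
-- _CATEGORY_ORDER = ["docs_only", "rag_only", "hybrid", "tool_action"]
--
-- _SCENARIO_ORDER = ["seed_mutation", "adversarial", "regression", "ambiguity"]
--
-- def _build_cell_targets(total: int) -> dict[tuple[str, str], int]: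
--     if total <= 0:
--         raise ValueError("target must be greater than 0")
--
--     rows = len(_CATEGORY_ORDER)
--     cols = len(_SCENARIO_ORDER)
--     base, remainder = divmod(total, rows * cols)
--
--     # Cell (r, c) receives one extra unit iff its unique diagonal index
--     # rows*((c-r) mod cols) + r falls below the remainder.
--     return {
--         (category, scenario): base + 1 if rows * ((c - r) % cols) + r < remainder else base
--         for r, category in enumerate(_CATEGORY_ORDER)
--         for c, scenario in enumerate(_SCENARIO_ORDER)
--     }
-- ===== Notes on version B (the rewrite author's own statement) =====
-- stated objective: alternative
-- what changed: B builds the whole dict in one comprehension, computing each cell's extra unit with a closed-form inverse of A's diagonal index mapping (rows*((c-r) mod cols) + r < remainder) instead of iterating over the remainder indices and mutating the dict.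
import Mathlib
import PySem

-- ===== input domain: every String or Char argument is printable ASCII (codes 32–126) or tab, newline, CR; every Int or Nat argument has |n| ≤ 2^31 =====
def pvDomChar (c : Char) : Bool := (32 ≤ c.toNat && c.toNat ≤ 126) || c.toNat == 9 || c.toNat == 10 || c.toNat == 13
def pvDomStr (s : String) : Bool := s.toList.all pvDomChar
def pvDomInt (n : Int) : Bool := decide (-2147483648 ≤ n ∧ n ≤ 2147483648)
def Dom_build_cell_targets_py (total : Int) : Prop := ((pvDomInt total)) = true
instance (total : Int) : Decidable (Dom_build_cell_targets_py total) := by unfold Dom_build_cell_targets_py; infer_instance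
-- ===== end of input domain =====

-- B replaces A's remainder-distribution loop with a one-pass comprehension using a closed-form per-cell test (objective: alternative decomposition).

-- ===== PORT A =====
def pvCats : List String := ["docs_only", "rag_only", "hybrid", "tool_action"]
def pvScens : List String := ["seed_mutation", "adversarial", "regression", "ambiguity"]

-- Port of A; Python raises ValueError for total ≤ 0 (excluded by Pre_), the port returns [] there.
def build_cell_targets_py (total : Int) : List (String × String × Int) :=
  if total ≤ 0 then []
  else
    let rows : Int := (pvCats.length : Int)
    let cols : Int := (pvScens.length : Int)
    let cells : Int := rows * cols
    let base : Int := PySem.Int.floordiv total cells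
    let remainder : Int := PySem.Int.mod total cells
    let targets : PySem.Dict (String × String) Int :=
      pvCats.foldl (fun d category =>
        pvScens.foldl (fun d scenario => d.insert (category, scenario) base) d)
        PySem.Dict.empty
    let targets :=
      (PySem.List.pyRange 0 remainder 1).foldl (fun d index =>
        let row := PySem.Int.mod index rows
        let col := PySem.Int.mod (PySem.Int.floordiv index rows + row) cols
        d.modify (PySem.List.pyGetD pvCats row "", PySem.List.pyGetD pvScens col "") 0 (· + 1)) targets
    targets.items.map (fun kv => (kv.1.1, kv.1.2, kv.2))

-- ===== PORT B =====
def build_cell_targets_py_alt (total : Int) : List (String × String × Int) :=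
  if total ≤ 0 then []
  else
    let rows : Int := (pvCats.length : Int)
    let cols : Int := (pvScens.length : Int)
    let base : Int := PySem.Int.floordiv total (rows * cols)
    let remainder : Int := PySem.Int.mod total (rows * cols)
    (PySem.List.enumerate pvCats).flatMap (fun rc =>
      (PySem.List.enumerate pvScens).map (fun cs =>
        (rc.2, cs.2,
          if rows * (PySem.Int.mod (cs.1 - rc.1) cols) + rc.1 < remainder then base + 1 else base)))

-- ===== PRECONDITION & SPEC =====
-- Pre_ excludes exactly total ≤ 0, where Python A raises ValueError.
def Pre_build_cell_targets_py (total : Int) : Prop := 0 < total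
instance (total : Int) : Decidable (Pre_build_cell_targets_py total) := by unfold Pre_build_cell_targets_py; infer_instance
def pvWitness_build_cell_targets_py : Int := 23

def Spec_build_cell_targets_py (total : Int) (out : List (String × String × Int)) : Prop := out = build_cell_targets_py_alt total
instance (total : Int) (out : List (String × String × Int)) : Decidable (Spec_build_cell_targets_py total out) := by unfold Spec_build_cell_targets_py; infer_instance

-- ===== CLAIM (what is proved, stated in full; the proofs are below) =====
def Claim_equal_build_cell_targets_py : Prop := ∀ (total : Int), Dom_build_cell_targets_py total → Pre_build_cell_targets_py total → Spec_build_cell_targets_py total (build_cell_targets_py total)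

-- ===== LEMMAS AND PROOFS =====

-- All 16 grid cells, in A's dict insertion order (= B's emission order).
def pvPairs : List (String × String) :=
  [("docs_only", "seed_mutation"), ("docs_only", "adversarial"), ("docs_only", "regression"), ("docs_only", "ambiguity"),
   ("rag_only", "seed_mutation"), ("rag_only", "adversarial"), ("rag_only", "regression"), ("rag_only", "ambiguity"),
   ("hybrid", "seed_mutation"), ("hybrid", "adversarial"), ("hybrid", "regression"), ("hybrid", "ambiguity"),
   ("tool_action", "seed_mutation"), ("tool_action", "adversarial"), ("tool_action", "regression"), ("tool_action", "ambiguity")]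

-- The cell A's remainder loop touches at iteration i.
def pvKey (i : Int) : String × String :=
  (PySem.List.pyGetD pvCats (PySem.Int.mod i 4) "",
   PySem.List.pyGetD pvScens (PySem.Int.mod (PySem.Int.floordiv i 4 + PySem.Int.mod i 4) 4) "")

lemma pv_key_mem (i : Int) : pvKey i ∈ pvPairs := by
  have h1 : PySem.Int.mod i 4 = 0 ∨ PySem.Int.mod i 4 = 1 ∨ PySem.Int.mod i 4 = 2 ∨ PySem.Int.mod i 4 = 3 := by
    have := PySem.Int.mod_nonneg i (b := 4) (by norm_num)
    have := PySem.Int.mod_lt i (b := 4) (by norm_num)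
    omega
  have h2 : ∀ j : Int, PySem.Int.mod j 4 = 0 ∨ PySem.Int.mod j 4 = 1 ∨ PySem.Int.mod j 4 = 2 ∨ PySem.Int.mod j 4 = 3 := by
    intro j
    have := PySem.Int.mod_nonneg j (b := 4) (by norm_num)
    have := PySem.Int.mod_lt j (b := 4) (by norm_num)
    omega
  unfold pvKey
  rcases h1 with h | h | h | h <;> rw [h] <;>
    rcases h2 (PySem.Int.floordiv i 4 + _) with h' | h' | h' | h' <;> rw [h'] <;>
      simp [pvCats, pvScens, pvPairs, PySem.List.pyGetD, PySem.List.pyGet?, PySem.List.pyIdx?]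

lemma pv_set_update_eq {α : Type} [BEq α] [LawfulBEq α] (ks l : List α) (h : ∀ x ∈ l, x ∈ ks) :
    PySem.Set.update ks l = ks := by
  unfold PySem.Set.update
  induction l generalizing ks with
  | nil => rfl
  | cons a t ih => simp_all [PySem.Set.add, List.foldl_cons]

-- A's initial dict holds all 16 cells at value b, in insertion order.
lemma pv_init_items (b : Int) :
    (pvCats.foldl (fun d category =>
        pvScens.foldl (fun d scenario => d.insert (category, scenario) b) d)
        PySem.Dict.empty : PySem.Dict (String × String) Int).items
      = pvPairs.map (fun k => (k, b)) := by
  simp only [pvCats, pvScens, List.foldl]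
  repeat rw [PySem.Dict.items_insert_of_not_contains _ _
    (by simp [PySem.Dict.contains_insert, PySem.Dict.contains_empty])]
  simp [pvPairs, PySem.Dict.empty]

lemma pv_core_eq (b r : Int) (hr0 : 0 ≤ r) (hr : r < 16) :
    (let targets : PySem.Dict (String × String) Int :=
      pvCats.foldl (fun d category =>
        pvScens.foldl (fun d scenario => d.insert (category, scenario) b) d)
        PySem.Dict.empty
     let targets :=
      (PySem.List.pyRange 0 r 1).foldl (fun d index =>
        let row := PySem.Int.mod index 4
        let col := PySem.Int.mod (PySem.Int.floordiv index 4 + row) 4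
        d.modify (PySem.List.pyGetD pvCats row "", PySem.List.pyGetD pvScens col "") 0 (· + 1)) targets
     targets.items.map (fun kv => (kv.1.1, kv.1.2, kv.2)))
    =
    (PySem.List.enumerate pvCats).flatMap (fun rc =>
      (PySem.List.enumerate pvScens).map (fun cs =>
        (rc.2, cs.2,
          if 4 * (PySem.Int.mod (cs.1 - rc.1) 4) + rc.1 < r then b + 1 else b))) := by
  show ((PySem.List.pyRange 0 r 1).foldl (fun d i => d.modify (pvKey i) 0 (· + 1))
      (pvCats.foldl (fun d category =>
        pvScens.foldl (fun d scenario => d.insert (category, scenario) b) d)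
        PySem.Dict.empty)).items.map (fun kv => (kv.1.1, kv.1.2, kv.2)) = _
  set d0 : PySem.Dict (String × String) Int :=
    pvCats.foldl (fun d category =>
        pvScens.foldl (fun d scenario => d.insert (category, scenario) b) d)
        PySem.Dict.empty with hd0
  have hitems0 : d0.items = pvPairs.map (fun k => (k, b)) := pv_init_items b
  have hkeys0 : d0.keys = pvPairs := by
    simp [PySem.Dict.keys, hitems0, Function.comp_def]
  have hnd0 : d0.keys.Nodup := by rw [hkeys0]; decide
  set F := (PySem.List.pyRange 0 r 1).foldl (fun d i => d.modify (pvKey i) 0 (· + 1)) d0 with hF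
  have hkeysF : F.keys = pvPairs := by
    rw [hF]
    rw [PySem.Dict.keys_foldl_modify_key (PySem.List.pyRange 0 r 1) pvKey 0 (fun _ _ => (· + 1)) d0]
    rw [hkeys0]
    exact pv_set_update_eq _ _ (fun x hx => by
      obtain ⟨i, _, hi⟩ := List.mem_map.mp hx
      exact hi ▸ pv_key_mem i)
  have hndF : F.keys.Nodup := by rw [hkeysF]; decide
  have hgetD0 : ∀ k ∈ pvPairs, d0.getD k 0 = b := by
    intro k hk
    have hmem : (k, b) ∈ d0.items := by
      rw [hitems0]; exact List.mem_map.mpr ⟨k, hk, rfl⟩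
    exact PySem.Dict.getD_of_mem_items d0 hmem hnd0 0
  have hgetDF : ∀ k, F.getD k 0 = d0.getD k 0 + (((PySem.List.pyRange 0 r 1).map pvKey).count k : Int) := by
    intro k
    rw [hF,
      show List.foldl (fun d i => d.modify (pvKey i) 0 fun v => v + 1) d0 (PySem.List.pyRange 0 r 1)
        = List.foldl (fun d x => d.modify x 0 fun v => v + 1) d0 ((PySem.List.pyRange 0 r 1).map pvKey)
        from (List.foldl_map (f := pvKey) (g := fun d x => d.modify x 0 fun v => v + 1)
          (l := PySem.List.pyRange 0 r 1) (init := d0)).symm]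
    exact PySem.Dict.getD_foldl_modify_add_one _ d0 k
  rw [PySem.Dict.items_eq_map_keys F hndF 0, hkeysF]
  have hitems : pvPairs.map (fun k => (k, F.getD k 0))
      = pvPairs.map (fun k => (k, b + (((PySem.List.pyRange 0 r 1).map pvKey).count k : Int))) := by
    apply List.map_congr_left
    intro k hk
    rw [hgetDF k, hgetD0 k hk]
  rw [hitems]
  have h16 : r = 0 ∨ r = 1 ∨ r = 2 ∨ r = 3 ∨ r = 4 ∨ r = 5 ∨ r = 6 ∨ r = 7 ∨ r = 8 ∨ r = 9 ∨ r = 10 ∨ r = 11 ∨ r = 12 ∨ r = 13 ∨ r = 14 ∨ r = 15 := by omega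
  rcases h16 with rfl|rfl|rfl|rfl|rfl|rfl|rfl|rfl|rfl|rfl|rfl|rfl|rfl|rfl|rfl|rfl
  · rw [show (PySem.List.pyRange 0 0 1).map pvKey = ([] : List (String × String)) from by decide]
    simp [pvPairs, pvCats, pvScens, PySem.List.enumerate, PySem.Int.mod, List.count_nil]
  · rw [show (PySem.List.pyRange 0 1 1).map pvKey = ([("docs_only", "seed_mutation")] : List (String × String)) from by decide]
    simp [pvPairs, pvCats, pvScens, PySem.List.enumerate, PySem.Int.mod,
      List.count_cons, List.count_nil]
  · rw [show (PySem.List.pyRange 0 2 1).map pvKey = ([("docs_only", "seed_mutation"), ("rag_only", "adversarial")] : List (String × String)) from by decide]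
    simp [pvPairs, pvCats, pvScens, PySem.List.enumerate, PySem.Int.mod,
      List.count_cons, List.count_nil]
  · rw [show (PySem.List.pyRange 0 3 1).map pvKey = ([("docs_only", "seed_mutation"), ("rag_only", "adversarial"), ("hybrid", "regression")] : List (String × String)) from by decide]
    simp [pvPairs, pvCats, pvScens, PySem.List.enumerate, PySem.Int.mod,
      List.count_cons, List.count_nil]
  · rw [show (PySem.List.pyRange 0 4 1).map pvKey = ([("docs_only", "seed_mutation"), ("rag_only", "adversarial"), ("hybrid", "regression"), ("tool_action", "ambiguity")] : List (String × String)) from by decide]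
    simp [pvPairs, pvCats, pvScens, PySem.List.enumerate, PySem.Int.mod,
      List.count_cons, List.count_nil]
  · rw [show (PySem.List.pyRange 0 5 1).map pvKey = ([("docs_only", "seed_mutation"), ("rag_only", "adversarial"), ("hybrid", "regression"), ("tool_action", "ambiguity"), ("docs_only", "adversarial")] : List (String × String)) from by decide]
    simp [pvPairs, pvCats, pvScens, PySem.List.enumerate, PySem.Int.mod,
      List.count_cons, List.count_nil]
  · rw [show (PySem.List.pyRange 0 6 1).map pvKey = ([("docs_only", "seed_mutation"), ("rag_only", "adversarial"), ("hybrid", "regression"), ("tool_action", "ambiguity"), ("docs_only", "adversarial"), ("rag_only", "regression")] : List (String × String)) from by decide]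
    simp [pvPairs, pvCats, pvScens, PySem.List.enumerate, PySem.Int.mod,
      List.count_cons, List.count_nil]
  · rw [show (PySem.List.pyRange 0 7 1).map pvKey = ([("docs_only", "seed_mutation"), ("rag_only", "adversarial"), ("hybrid", "regression"), ("tool_action", "ambiguity"), ("docs_only", "adversarial"), ("rag_only", "regression"), ("hybrid", "ambiguity")] : List (String × String)) from by decide]
    simp [pvPairs, pvCats, pvScens, PySem.List.enumerate, PySem.Int.mod,
      List.count_cons, List.count_nil]
  · rw [show (PySem.List.pyRange 0 8 1).map pvKey = ([("docs_only", "seed_mutation"), ("rag_only", "adversarial"), ("hybrid", "regression"), ("tool_action", "ambiguity"), ("docs_only", "adversarial"), ("rag_only", "regression"), ("hybrid", "ambiguity"), ("tool_action", "seed_mutation")] : List (String × String)) from by decide]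
    simp [pvPairs, pvCats, pvScens, PySem.List.enumerate, PySem.Int.mod,
      List.count_cons, List.count_nil]
  · rw [show (PySem.List.pyRange 0 9 1).map pvKey = ([("docs_only", "seed_mutation"), ("rag_only", "adversarial"), ("hybrid", "regression"), ("tool_action", "ambiguity"), ("docs_only", "adversarial"), ("rag_only", "regression"), ("hybrid", "ambiguity"), ("tool_action", "seed_mutation"), ("docs_only", "regression")] : List (String × String)) from by decide]
    simp [pvPairs, pvCats, pvScens, PySem.List.enumerate, PySem.Int.mod,
      List.count_cons, List.count_nil]
  · rw [show (PySem.List.pyRange 0 10 1).map pvKey = ([("docs_only", "seed_mutation"), ("rag_only", "adversarial"), ("hybrid", "regression"), ("tool_action", "ambiguity"), ("docs_only", "adversarial"), ("rag_only", "regression"), ("hybrid", "ambiguity"), ("tool_action", "seed_mutation"), ("docs_only", "regression"), ("rag_only", "ambiguity")] : List (String × String)) from by decide]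
    simp [pvPairs, pvCats, pvScens, PySem.List.enumerate, PySem.Int.mod,
      List.count_cons, List.count_nil]
  · rw [show (PySem.List.pyRange 0 11 1).map pvKey = ([("docs_only", "seed_mutation"), ("rag_only", "adversarial"), ("hybrid", "regression"), ("tool_action", "ambiguity"), ("docs_only", "adversarial"), ("rag_only", "regression"), ("hybrid", "ambiguity"), ("tool_action", "seed_mutation"), ("docs_only", "regression"), ("rag_only", "ambiguity"), ("hybrid", "seed_mutation")] : List (String × String)) from by decide]
    simp [pvPairs, pvCats, pvScens, PySem.List.enumerate, PySem.Int.mod,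
      List.count_cons, List.count_nil]
  · rw [show (PySem.List.pyRange 0 12 1).map pvKey = ([("docs_only", "seed_mutation"), ("rag_only", "adversarial"), ("hybrid", "regression"), ("tool_action", "ambiguity"), ("docs_only", "adversarial"), ("rag_only", "regression"), ("hybrid", "ambiguity"), ("tool_action", "seed_mutation"), ("docs_only", "regression"), ("rag_only", "ambiguity"), ("hybrid", "seed_mutation"), ("tool_action", "adversarial")] : List (String × String)) from by decide]
    simp [pvPairs, pvCats, pvScens, PySem.List.enumerate, PySem.Int.mod,
      List.count_cons, List.count_nil]
  · rw [show (PySem.List.pyRange 0 13 1).map pvKey = ([("docs_only", "seed_mutation"), ("rag_only", "adversarial"), ("hybrid", "regression"), ("tool_action", "ambiguity"), ("docs_only", "adversarial"), ("rag_only", "regression"), ("hybrid", "ambiguity"), ("tool_action", "seed_mutation"), ("docs_only", "regression"), ("rag_only", "ambiguity"), ("hybrid", "seed_mutation"), ("tool_action", "adversarial"), ("docs_only", "ambiguity")] : List (String × String)) from by decide]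
    simp [pvPairs, pvCats, pvScens, PySem.List.enumerate, PySem.Int.mod,
      List.count_cons, List.count_nil]
  · rw [show (PySem.List.pyRange 0 14 1).map pvKey = ([("docs_only", "seed_mutation"), ("rag_only", "adversarial"), ("hybrid", "regression"), ("tool_action", "ambiguity"), ("docs_only", "adversarial"), ("rag_only", "regression"), ("hybrid", "ambiguity"), ("tool_action", "seed_mutation"), ("docs_only", "regression"), ("rag_only", "ambiguity"), ("hybrid", "seed_mutation"), ("tool_action", "adversarial"), ("docs_only", "ambiguity"), ("rag_only", "seed_mutation")] : List (String × String)) from by decide]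
    simp [pvPairs, pvCats, pvScens, PySem.List.enumerate, PySem.Int.mod,
      List.count_cons, List.count_nil]
  · rw [show (PySem.List.pyRange 0 15 1).map pvKey = ([("docs_only", "seed_mutation"), ("rag_only", "adversarial"), ("hybrid", "regression"), ("tool_action", "ambiguity"), ("docs_only", "adversarial"), ("rag_only", "regression"), ("hybrid", "ambiguity"), ("tool_action", "seed_mutation"), ("docs_only", "regression"), ("rag_only", "ambiguity"), ("hybrid", "seed_mutation"), ("tool_action", "adversarial"), ("docs_only", "ambiguity"), ("rag_only", "seed_mutation"), ("hybrid", "adversarial")] : List (String × String)) from by decide]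
    simp [pvPairs, pvCats, pvScens, PySem.List.enumerate, PySem.Int.mod,
      List.count_cons, List.count_nil]
theorem build_cell_targets_py_spec : Claim_equal_build_cell_targets_py := by
  intro total _ hpre
  show build_cell_targets_py total = build_cell_targets_py_alt total
  unfold build_cell_targets_py build_cell_targets_py_alt
  rw [if_neg (not_le.mpr hpre), if_neg (not_le.mpr hpre)]
  have h := pv_core_eq (PySem.Int.floordiv total 16) (PySem.Int.mod total 16)
    (PySem.Int.mod_nonneg total (by norm_num)) (PySem.Int.mod_lt total (by norm_num))
  simpa [pvCats, pvScens] using h
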